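-- pv_equiv track=rewrite | github.com/pypi-data/pypi-mirror-298 | packages/ittaxcode/ittaxcode-0.0.1-py3-none-any.whl/ittaxcode/ittc.py | omocodie
-- ===== SOURCE A (Python) =====
-- def omocodie (codfisc):
--     caratteri = {
--         "L": "0",
--         "M": "1",
--         "N": "2",
--         "P": "3",
--         "Q": "4",
--         "R": "5",
--         "S": "6",
--         "T": "7",
--         "U": "8",
--         "V": "9"
--     }
--
--     # Lo porto in maiuscolo
--     codfisc = codfisc.upper()
--
--     # Nelle posizioni dove sono le x, qualora si trovi un carattere, va sostituito con il numero per le omocodie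
--     mask = "cccnnnxxMxx*xxxC"
--
--     codfisco = ""
--     lungo = len(codfisc)
--
--     # Spazzolo tutta la stringa e ne creo una "ripulita" dai caratteri
--     # eventualmente presenti per la gestione delle omocodie
--     for x in range(0, lungo):
--         dgt_cod = codfisc[x:x+1]
--         dgt_mask = mask[x:x+1]
--         if dgt_mask == "x":
--             try:
--                 # dovrei mettere un'altra if
--                 # ed operare soltanto se dgt_cod fosse stringa
--                 # ma tanto se non lo è, fallisce la riga sottostante
--                 # e nulla cambia! ;)
--                 dgt_cod = caratteri[dgt_cod]
--             except:
--                 # se non trova omocodia lascia il carattere invariato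
--                 pass
--
--         codfisco = codfisco + dgt_cod
--
--     return codfisco
-- ===== SOURCE B (Python) =====
-- # B: instead of scanning the whole string against the mask, touch only the seven
-- # fixed omocodia positions of the mask in a mutable char list (O(n) vs A's quadratic
-- # string concatenation).
--
-- _XPOS = (6, 7, 9, 10, 12, 13, 14)  # the omocodia indices of the mask "cccnnnxxMxx*xxxC"
-- _OMO = {"L": "0", "M": "1", "N": "2", "P": "3", "Q": "4",
--         "R": "5", "S": "6", "T": "7", "U": "8", "V": "9"}
--
--
-- def omocodie(codfisc):
--     chars = list(codfisc.upper())
--     n = len(chars)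
--     for p in _XPOS:
--         if p < n:
--             chars[p] = _OMO.get(chars[p], chars[p])
--     return "".join(chars)
-- ===== Notes on version B (the rewrite author's own statement) =====
-- stated objective: faster
-- what changed: B replaces A's full scan with repeated string concatenation by a mutable character list updated only at the seven fixed omocodia positions of the mask, then joined once.
import Mathlib
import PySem

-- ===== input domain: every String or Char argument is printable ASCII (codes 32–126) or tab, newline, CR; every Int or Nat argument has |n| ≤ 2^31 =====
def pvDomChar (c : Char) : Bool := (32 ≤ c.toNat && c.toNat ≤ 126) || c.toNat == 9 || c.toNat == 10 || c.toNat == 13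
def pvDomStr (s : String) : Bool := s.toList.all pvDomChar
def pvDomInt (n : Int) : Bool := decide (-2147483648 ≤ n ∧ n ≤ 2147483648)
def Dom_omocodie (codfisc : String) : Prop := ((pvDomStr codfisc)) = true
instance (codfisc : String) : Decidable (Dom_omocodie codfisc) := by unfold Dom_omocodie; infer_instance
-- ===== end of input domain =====

-- B touches only the seven fixed omocodia positions of a character list instead of
-- rebuilding the string character by character (measured faster; A's repeated
-- string concatenation is quadratic).


-- ===== PORT A =====
-- A's dict keyed by one-character strings (ported on code points, exact here)
def omocodieCaratteri : PySem.Dict (List Char) (List Char) :=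
  PySem.Dict.ofList [(['L'], ['0']), (['M'], ['1']), (['N'], ['2']), (['P'], ['3']),
    (['Q'], ['4']), (['R'], ['5']), (['S'], ['6']), (['T'], ['7']), (['U'], ['8']), (['V'], ['9'])]

def omocodie (codfisc : String) : String :=
  let cf := (PySem.Str.upper codfisc).toList
  let mask := "cccnnnxxMxx*xxxC".toList
  let lungo : Int := cf.length
  String.ofList ((PySem.List.pyRange 0 lungo 1).foldl (fun codfisco x =>
    let dgt_cod := PySem.List.slice cf (some x) (some (x + 1))
    let dgt_mask := PySem.List.slice mask (some x) (some (x + 1))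
    let dgt_cod' := if dgt_mask = ['x'] then (omocodieCaratteri.get? dgt_cod).getD dgt_cod
      else dgt_cod
    codfisco ++ dgt_cod') [])

-- ===== PORT B =====
def omocodieXpos : List Nat := [6, 7, 9, 10, 12, 13, 14]

def omocodieOmo : PySem.Dict Char Char :=
  PySem.Dict.ofList [('L', '0'), ('M', '1'), ('N', '2'), ('P', '3'), ('Q', '4'),
    ('R', '5'), ('S', '6'), ('T', '7'), ('U', '8'), ('V', '9')]

def omocodie_alt (codfisc : String) : String :=
  let cs := (PySem.Str.upper codfisc).toList
  String.ofList (omocodieXpos.foldl (fun l p =>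
    if h : p < l.length then l.set p (omocodieOmo.getD l[p] l[p]) else l) cs)

-- ===== PRECONDITION & SPEC =====
def Spec_omocodie (codfisc : String) (out : String) : Prop := out = omocodie_alt codfisc
instance (codfisc : String) (out : String) : Decidable (Spec_omocodie codfisc out) := by unfold Spec_omocodie; infer_instance

-- ===== CLAIM (what is proved, stated in full; the proofs are below) =====
def Claim_equal_omocodie : Prop := ∀ (codfisc : String), Dom_omocodie codfisc → Spec_omocodie codfisc (omocodie codfisc)

-- ===== LEMMAS AND PROOFS =====

-- the common per-character substitution both dict lookups compute
def pvSub (c : Char) : Char :=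
  if c = 'L' then '0' else if c = 'M' then '1' else if c = 'N' then '2' else
  if c = 'P' then '3' else if c = 'Q' then '4' else if c = 'R' then '5' else
  if c = 'S' then '6' else if c = 'T' then '7' else if c = 'U' then '8' else
  if c = 'V' then '9' else c

-- the character A (resp. B) puts at position k, as a total function
def pvChar (cs : List Char) (k : Nat) : Char :=
  if k ∈ omocodieXpos then pvSub (cs.getD k 'a') else cs.getD k 'a'

lemma lookupA (c : Char) : (omocodieCaratteri.get? [c]).getD [c] = [pvSub c] := by
  have hit : omocodieCaratteri.items = [(['L'], ['0']), (['M'], ['1']), (['N'], ['2']), (['P'], ['3']), (['Q'], ['4']), (['R'], ['5']), (['S'], ['6']), (['T'], ['7']), (['U'], ['8']), (['V'], ['9'])] := by decide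
  by_cases h1 : c = 'L'
  · subst h1; decide
  by_cases h2 : c = 'M'
  · subst h2; decide
  by_cases h3 : c = 'N'
  · subst h3; decide
  by_cases h4 : c = 'P'
  · subst h4; decide
  by_cases h5 : c = 'Q'
  · subst h5; decide
  by_cases h6 : c = 'R'
  · subst h6; decide
  by_cases h7 : c = 'S'
  · subst h7; decide
  by_cases h8 : c = 'T'
  · subst h8; decide
  by_cases h9 : c = 'U'
  · subst h9; decide
  by_cases h10 : c = 'V'
  · subst h10; decide
  have hsub : pvSub c = c := by simp [pvSub, h1, h2, h3, h4, h5, h6, h7, h8, h9, h10]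
  have hb1 : ((['L'] : List Char) == [c]) = false := beq_eq_false_iff_ne.mpr (by simp [eq_comm, h1])
  have hb2 : ((['M'] : List Char) == [c]) = false := beq_eq_false_iff_ne.mpr (by simp [eq_comm, h2])
  have hb3 : ((['N'] : List Char) == [c]) = false := beq_eq_false_iff_ne.mpr (by simp [eq_comm, h3])
  have hb4 : ((['P'] : List Char) == [c]) = false := beq_eq_false_iff_ne.mpr (by simp [eq_comm, h4])
  have hb5 : ((['Q'] : List Char) == [c]) = false := beq_eq_false_iff_ne.mpr (by simp [eq_comm, h5])
  have hb6 : ((['R'] : List Char) == [c]) = false := beq_eq_false_iff_ne.mpr (by simp [eq_comm, h6])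
  have hb7 : ((['S'] : List Char) == [c]) = false := beq_eq_false_iff_ne.mpr (by simp [eq_comm, h7])
  have hb8 : ((['T'] : List Char) == [c]) = false := beq_eq_false_iff_ne.mpr (by simp [eq_comm, h8])
  have hb9 : ((['U'] : List Char) == [c]) = false := beq_eq_false_iff_ne.mpr (by simp [eq_comm, h9])
  have hb10 : ((['V'] : List Char) == [c]) = false := beq_eq_false_iff_ne.mpr (by simp [eq_comm, h10])
  simp only [PySem.Dict.get?, hit, List.find?, hb1, hb2, hb3, hb4, hb5, hb6, hb7, hb8, hb9, hb10, hsub]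
  rfl

lemma lookupB (c : Char) : omocodieOmo.getD c c = pvSub c := by
  have hit : omocodieOmo.items = [('L', '0'), ('M', '1'), ('N', '2'), ('P', '3'), ('Q', '4'), ('R', '5'), ('S', '6'), ('T', '7'), ('U', '8'), ('V', '9')] := by decide
  by_cases h1 : c = 'L'
  · subst h1; decide
  by_cases h2 : c = 'M'
  · subst h2; decide
  by_cases h3 : c = 'N'
  · subst h3; decide
  by_cases h4 : c = 'P'
  · subst h4; decide
  by_cases h5 : c = 'Q'
  · subst h5; decide
  by_cases h6 : c = 'R'
  · subst h6; decide
  by_cases h7 : c = 'S'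
  · subst h7; decide
  by_cases h8 : c = 'T'
  · subst h8; decide
  by_cases h9 : c = 'U'
  · subst h9; decide
  by_cases h10 : c = 'V'
  · subst h10; decide
  have hsub : pvSub c = c := by simp [pvSub, h1, h2, h3, h4, h5, h6, h7, h8, h9, h10]
  have hb1 : (('L' : Char) == c) = false := beq_eq_false_iff_ne.mpr (Ne.symm h1)
  have hb2 : (('M' : Char) == c) = false := beq_eq_false_iff_ne.mpr (Ne.symm h2)
  have hb3 : (('N' : Char) == c) = false := beq_eq_false_iff_ne.mpr (Ne.symm h3)
  have hb4 : (('P' : Char) == c) = false := beq_eq_false_iff_ne.mpr (Ne.symm h4)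
  have hb5 : (('Q' : Char) == c) = false := beq_eq_false_iff_ne.mpr (Ne.symm h5)
  have hb6 : (('R' : Char) == c) = false := beq_eq_false_iff_ne.mpr (Ne.symm h6)
  have hb7 : (('S' : Char) == c) = false := beq_eq_false_iff_ne.mpr (Ne.symm h7)
  have hb8 : (('T' : Char) == c) = false := beq_eq_false_iff_ne.mpr (Ne.symm h8)
  have hb9 : (('U' : Char) == c) = false := beq_eq_false_iff_ne.mpr (Ne.symm h9)
  have hb10 : (('V' : Char) == c) = false := beq_eq_false_iff_ne.mpr (Ne.symm h10)
  simp only [PySem.Dict.getD, PySem.Dict.get?, hit, List.find?, hb1, hb2, hb3, hb4, hb5, hb6, hb7, hb8, hb9, hb10, hsub]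
  rfl

lemma maskMem (k : Nat) :
    (PySem.List.slice "cccnnnxxMxx*xxxC".toList (some (k : Int)) (some ((k : Int) + 1)) = ['x'])
      ↔ k ∈ omocodieXpos := by
  rw [PySem.List.slice_toNat (ha := by positivity) (hb := by positivity)]
  by_cases hk : k < 16
  · interval_cases k <;> decide
  · have : ("cccnnnxxMxx*xxxC".toList.drop (((k : Int)).toNat)) = [] := by
      apply List.drop_eq_nil_of_le; simp; omega
    rw [this]
    simp [omocodieXpos]; omega

lemma sliceA (cs : List Char) (k : Nat) (hk : k < cs.length) :
    PySem.List.slice cs (some (k : Int)) (some ((k : Int) + 1)) = [cs.getD k 'a'] := by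
  rw [PySem.List.slice_toNat (ha := by positivity) (hb := by positivity)]
  have h1 : ((k : Int)).toNat = k := by omega
  have h2 : (((k : Int) + 1)).toNat = k + 1 := by omega
  rw [h1, h2, show k + 1 - k = 1 from by omega, List.take_one, List.head?_drop,
    List.getElem?_eq_getElem hk]
  simp [List.getD, List.getElem?_eq_getElem hk]

lemma flatMap_eq_map_of {α β : Type} (l : List α) (f : α → List β) (g : α → β)
    (h : ∀ x ∈ l, f x = [g x]) : l.flatMap f = l.map g := by
  induction l with
  | nil => rfl
  | cons x xs ih => simp_all

lemma A_list (cs : List Char) :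
    (PySem.List.pyRange 0 (cs.length : Int) 1).foldl (fun codfisco x =>
      let dgt_cod := PySem.List.slice cs (some x) (some (x + 1))
      let dgt_mask := PySem.List.slice "cccnnnxxMxx*xxxC".toList (some x) (some (x + 1))
      let dgt_cod' := if dgt_mask = ['x'] then (omocodieCaratteri.get? dgt_cod).getD dgt_cod
        else dgt_cod
      codfisco ++ dgt_cod') []
    = (List.range cs.length).map (pvChar cs) := by
  rw [PySem.List.foldl_append_eq_flatMap, PySem.List.pyRange_one]
  simp only [sub_zero, Int.toNat_natCast, List.flatMap_map, zero_add, List.nil_append]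
  apply flatMap_eq_map_of
  intro k hk
  rw [List.mem_range] at hk
  simp only [sliceA cs k hk]
  by_cases hx : k ∈ omocodieXpos
  · rw [if_pos ((maskMem k).mpr hx), lookupA, pvChar, if_pos hx]
  · rw [if_neg (fun h => hx ((maskMem k).mp h)), pvChar, if_neg hx]

-- step function of B's fold
def pvStep (l : List Char) (p : Nat) : List Char :=
  if h : p < l.length then l.set p (omocodieOmo.getD l[p] l[p]) else l

lemma B_get_notmem (ps : List Nat) (l : List Char) (i : Nat) (hi : i ∉ ps) :
    (ps.foldl pvStep l)[i]? = l[i]? := by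
  induction ps generalizing l with
  | nil => rfl
  | cons p ps ih =>
    simp only [List.mem_cons, not_or] at hi
    rw [List.foldl_cons, ih _ hi.2]
    unfold pvStep; split
    · rw [List.getElem?_set_ne (by omega)]
    · rfl

lemma B_get (ps : List Nat) (hnd : ps.Nodup) (l : List Char) (i : Nat) :
    (ps.foldl pvStep l)[i]? =
      if i ∈ ps then l[i]?.map (fun c => omocodieOmo.getD c c) else l[i]? := by
  induction ps generalizing l with
  | nil => rfl
  | cons p ps ih =>
    rw [List.foldl_cons]
    rcases List.nodup_cons.mp hnd with ⟨hp, hnd'⟩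
    by_cases hip : i = p
    · subst hip
      rw [B_get_notmem ps _ i hp, if_pos (List.mem_cons_self)]
      unfold pvStep; split
      · rename_i h
        rw [List.getElem?_set_self (by omega), List.getElem?_eq_getElem h]
        simp
      · rename_i h
        rw [List.getElem?_eq_none (by omega)]
        rfl
    · rw [ih hnd']
      have hl : l[i]? = (pvStep l p)[i]? := by
        unfold pvStep; split
        · rw [List.getElem?_set_ne (by omega)]
        · rfl
      simp only [List.mem_cons, hip, false_or, ← hl]

lemma B_list (cs : List Char) :
    omocodieXpos.foldl pvStep cs = (List.range cs.length).map (pvChar cs) := by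
  apply List.ext_getElem?
  intro i
  rw [B_get omocodieXpos (by decide) cs i]
  by_cases hi : i < cs.length
  · rw [List.getElem?_map, List.getElem?_range hi, Option.map_some]
    rw [pvChar]
    by_cases hx : i ∈ omocodieXpos
    · rw [if_pos hx, if_pos hx, List.getElem?_eq_getElem hi, Option.map_some, lookupB]
      simp [List.getD, List.getElem?_eq_getElem hi]
    · rw [if_neg hx, if_neg hx]
      simp [List.getD, List.getElem?_eq_getElem hi]
  · rw [List.getElem?_eq_none (by simpa using hi),
      List.getElem?_eq_none (by simp; omega)]
    split <;> simp

-- ===== VERDICT (by name: the statement is the Claim_ definition above) =====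
theorem omocodie_spec : Claim_equal_omocodie := by
  intro codfisc _
  unfold Spec_omocodie omocodie omocodie_alt
  have hB := B_list ((PySem.Str.upper codfisc).toList)
  unfold pvStep at hB
  simp only [hB, A_list]
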